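-- pv_equiv track=rewrite | github.com/Nagar203/Leetcode | 2493. Divide Nodes Into the Maximum Number of Groups/Approach01.py | bfs
-- ===== SOURCE A (Python) =====
-- from collections import deque
-- from typing import List
--
-- def bfs(adjacencyList: List[List[int]], startNode: int) -> int:
--     depth = 0
--     nodeQueue = deque([startNode])
--     nodeDepthMap = {startNode: 1}
--
--     while nodeQueue:
--         depth += 1
--         for _ in range(len(nodeQueue)):
--             currentNode = nodeQueue.popleft()
--             for neighbor in adjacencyList[currentNode]:
--                 if neighbor not in nodeDepthMap:
--                     nodeQueue.append(neighbor)
--                     nodeDepthMap[neighbor] = depth + 1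
--                 elif nodeDepthMap[neighbor] == depth:
--                     return -1  # Odd-length cycle detected
--
--     return depth
-- ===== SOURCE B (Python) =====
-- from typing import List
--
-- def bfs(adjacencyList: List[List[int]], startNode: int) -> int:
--     # Queue-free fixed-point relaxation: rounds over a snapshot of the distance
--     # dict until no new node appears; same-level edge = odd cycle -> -1.
--     dist = {startNode: 1}
--     changed = True
--     while changed:
--         changed = False
--         for u in list(dist):
--             du = dist[u]
--             for v in adjacencyList[u]:
--                 if v not in dist:
--                     dist[v] = du + 1
--                     changed = True
--                 elif dist[v] == du:
--                     return -1
--     return max(dist.values())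
-- ===== Notes on version B (the rewrite author's own statement) =====
-- stated objective: alternative
-- what changed: Replaces the queue-based level-synchronized BFS with a queue-free fixed-point relaxation: repeated rounds over a snapshot of the distance dict insert each unseen neighbour one level deeper (flagging same-level edges as odd cycles) until no new node appears, then returns max of the map's values.
import Mathlib
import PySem

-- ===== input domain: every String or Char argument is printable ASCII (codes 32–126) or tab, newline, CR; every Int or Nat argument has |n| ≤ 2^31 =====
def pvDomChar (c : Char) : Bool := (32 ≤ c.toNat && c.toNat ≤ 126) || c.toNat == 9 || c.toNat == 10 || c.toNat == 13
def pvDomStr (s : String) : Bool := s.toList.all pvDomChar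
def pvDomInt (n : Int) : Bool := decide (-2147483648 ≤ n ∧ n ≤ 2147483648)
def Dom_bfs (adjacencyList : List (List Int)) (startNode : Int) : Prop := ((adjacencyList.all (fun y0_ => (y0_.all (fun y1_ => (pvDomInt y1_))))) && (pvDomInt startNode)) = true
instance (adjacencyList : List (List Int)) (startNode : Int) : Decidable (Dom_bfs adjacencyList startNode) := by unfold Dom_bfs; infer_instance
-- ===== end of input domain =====

-- B replaces A's queue-based level-synchronized BFS by a queue-free fixed-point relaxation:
-- repeated rounds over a snapshot of the distance dict insert each unseen neighbour one level
-- deeper and flag same-level edges (odd cycles), until no new node appears; the answer is the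
-- max of the map's values. The two ports are proved equal on Pre_ (the proof itself needs no
-- hypothesis beyond the ports' totalized indexing; Pre_ keeps the Python runs away from
-- IndexError). Both ports carry a fuel guard (len(flatten)+2) purely for totality; it is proved
-- unreachable inside the equivalence proof.

-- ===== PORT A =====
-- adjacencyList[x], totalized with [] where Python raises IndexError (excluded by Pre_ up to
-- the point where both programs have already returned)
def pvNeigh (adjacencyList : List (List Int)) (x : Int) : List Int :=
  (PySem.List.pyGet? adjacencyList x).getD []

-- inner 'for neighbor in adjacencyList[currentNode]' of A: none = 'return -1'
def stepA : List Int → Int → List Int → PySem.Dict Int Int → Option (List Int × PySem.Dict Int Int)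
  | [], _, next, m => some (next, m)
  | nb :: rest, depth, next, m =>
    match PySem.Dict.get? m nb with
    | none => stepA rest depth (next ++ [nb]) (PySem.Dict.insert m nb (depth + 1))
    | some v => if v = depth then none else stepA rest depth next m

inductive LRes where
  | fail : LRes
  | exhausted : LRes
  | ok : List Int → PySem.Dict Int Int → Nat → LRes

-- the inner 'for _ in range(len(nodeQueue))' loop of A over the snapshot of the queue
def levelA (adjacencyList : List (List Int)) : Nat → List Int → Int → List Int → PySem.Dict Int Int → LRes
  | fuel, [], _, next, m => .ok next m fuel
  | 0, _ :: _, _, _, _ => .exhausted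
  | fuel + 1, x :: rest, depth, next, m =>
    match stepA (pvNeigh adjacencyList x) depth next m with
    | none => .fail
    | some (next', m') => levelA adjacencyList fuel rest depth next' m'

-- fuel strictly decreases across a completed nonempty level (termination of outerA)
theorem levelA_fuel_lt (adjacencyList : List (List Int)) :
    ∀ (fuel : Nat) (q : List Int) (depth : Int) (next : List Int) (m : PySem.Dict Int Int)
      (q' : List Int) (m' : PySem.Dict Int Int) (fuel' : Nat), q ≠ [] →
      levelA adjacencyList fuel q depth next m = .ok q' m' fuel' → fuel' < fuel := by
  intro fuel q
  induction q generalizing fuel with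
  | nil => intro _ _ _ _ _ _ hq _; exact absurd rfl hq
  | cons x rest ih =>
    intro depth next m q' m' fuel' _ h
    cases fuel with
    | zero => simp [levelA] at h
    | succ f =>
      rw [levelA] at h
      cases hs : stepA (pvNeigh adjacencyList x) depth next m with
      | none => rw [hs] at h; simp at h
      | some p =>
        rw [hs] at h
        cases rest with
        | nil =>
          simp [levelA] at h
          omega
        | cons y t =>
          have := ih f depth p.1 p.2 q' m' fuel' (by simp) h
          omega

-- outer 'while nodeQueue:' of A; -2 only on fuel exhaustion (proved unreachable below)
def outerA (adjacencyList : List (List Int)) (fuel : Nat) (depth : Int)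
    (q : List Int) (m : PySem.Dict Int Int) : Int :=
  if hq0 : q = [] then depth
  else
    match h2 : levelA adjacencyList fuel q (depth + 1) [] m with
    | .fail => -1
    | .exhausted => -2
    | .ok q' m' fuel' => outerA adjacencyList fuel' (depth + 1) q' m'
termination_by fuel
decreasing_by exact levelA_fuel_lt adjacencyList fuel q (depth + 1) [] m q' m' fuel' hq0 h2

def bfs (adjacencyList : List (List Int)) (startNode : Int) : Int :=
  outerA adjacencyList (adjacencyList.flatten.length + 2) 0 [startNode]
    (PySem.Dict.insert PySem.Dict.empty startNode 1)

-- ===== PORT B =====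
-- inner 'for v in adjacencyList[u]' of B's relaxation: none = 'return -1'
def relaxNb : List Int → Int → PySem.Dict Int Int → Bool → Option (PySem.Dict Int Int × Bool)
  | [], _, m, ch => some (m, ch)
  | v :: rest, du, m, ch =>
    match PySem.Dict.get? m v with
    | none => relaxNb rest du (PySem.Dict.insert m v (du + 1)) true
    | some w => if w = du then none else relaxNb rest du m ch

-- 'for u in list(dist)' of one relaxation round (snapshot of the keys)
def relaxKeys (adjacencyList : List (List Int)) : List Int → PySem.Dict Int Int → Bool → Option (PySem.Dict Int Int × Bool)
  | [], m, ch => some (m, ch)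
  | u :: rest, m, ch =>
    match relaxNb (pvNeigh adjacencyList u) (PySem.Dict.getD m u 0) m ch with
    | none => none
    | some (m', ch') => relaxKeys adjacencyList rest m' ch'

inductive RRes where
  | conflict : RRes
  | exhausted : RRes
  | out : PySem.Dict Int Int → RRes

-- 'while changed:' of B; .exhausted only on fuel exhaustion (proved unreachable below)
def relaxLoop (adjacencyList : List (List Int)) : Nat → PySem.Dict Int Int → RRes
  | 0, _ => .exhausted
  | fuel + 1, m =>
    match relaxKeys adjacencyList (PySem.Dict.keys m) m false with
    | none => .conflict
    | some (m', ch) => if ch then relaxLoop adjacencyList fuel m' else .out m'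

def bfs_alt (adjacencyList : List (List Int)) (startNode : Int) : Int :=
  match relaxLoop adjacencyList (adjacencyList.flatten.length + 2)
      (PySem.Dict.insert PySem.Dict.empty startNode 1) with
  | .conflict => -1
  | .exhausted => -2
  | .out finalDist =>
    (PySem.List.max? (PySem.Dict.values finalDist) (fun y => y)).getD 0

-- ===== PRECONDITION & SPEC =====
-- x is a valid Python index into adjacencyList
abbrev pvValidIdx (adjacencyList : List (List Int)) (x : Int) : Prop :=
  -(adjacencyList.length : Int) ≤ x ∧ x < adjacencyList.length

-- nodes reachable from startNode (closure under following the rows of valid indices,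
-- iterated enough times to reach the fixpoint)
def pvReach (adjacencyList : List (List Int)) (startNode : Int) : List Int :=
  Nat.iterate
    (fun s => PySem.Set.ofList (s ++ s.flatMap (fun x => pvNeigh adjacencyList x)))
    (adjacencyList.flatten.length + 1) [startNode]

-- BFS frontiers over the totalized graph: (seen so far, k-th frontier in discovery order)
def pvFrontiers (adjacencyList : List (List Int)) (startNode : Int) : Nat → List Int × List Int
  | 0 => ([startNode], [startNode])
  | k + 1 =>
    let p := pvFrontiers adjacencyList startNode k
    let nw := (p.2.flatMap (pvNeigh adjacencyList)).filter (fun v => decide (v ∉ p.1))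
    (p.1 ++ nw, nw)

-- Pre_ holds exactly when the BFS pops no out-of-range index before detecting its odd cycle:
-- either every reachable node is a valid index, or a same-level edge is met at a frontier
-- position preceded only by valid indices (then A returns -1 before any IndexError);
-- outside Pre_, Python A — and B alike — raises IndexError.
def Pre_bfs (adjacencyList : List (List Int)) (startNode : Int) : Prop :=
  (∀ x ∈ pvReach adjacencyList startNode, pvValidIdx adjacencyList x) ∨
  (∃ k ∈ List.range (adjacencyList.flatten.length + 1),
    (∀ j ∈ List.range k, ∀ x ∈ (pvFrontiers adjacencyList startNode j).2,
      pvValidIdx adjacencyList x) ∧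
    ∃ i ∈ List.range (pvFrontiers adjacencyList startNode k).2.length,
      (∀ j2 ∈ List.range (i + 1),
        pvValidIdx adjacencyList ((pvFrontiers adjacencyList startNode k).2.getD j2 0)) ∧
      ∃ v ∈ pvNeigh adjacencyList ((pvFrontiers adjacencyList startNode k).2.getD i 0),
        v ∈ (pvFrontiers adjacencyList startNode k).2)
instance (adjacencyList : List (List Int)) (startNode : Int) : Decidable (Pre_bfs adjacencyList startNode) := by unfold Pre_bfs; infer_instance

def pvWitness_bfs : List (List Int) × Int := ([[1], [0]], 0)

def Spec_bfs (adjacencyList : List (List Int)) (startNode : Int) (out : Int) : Prop := out = bfs_alt adjacencyList startNode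
instance (adjacencyList : List (List Int)) (startNode : Int) (out : Int) : Decidable (Spec_bfs adjacencyList startNode out) := by unfold Spec_bfs; infer_instance

-- ===== CLAIM (what is proved, stated in full; the proofs are below) =====
def Claim_equal_bfs : Prop := ∀ (adjacencyList : List (List Int)) (startNode : Int), Dom_bfs adjacencyList startNode → Pre_bfs adjacencyList startNode → Spec_bfs adjacencyList startNode (bfs adjacencyList startNode)

-- ===== LEMMAS AND PROOFS =====

-- every neighbour list element is an element of the flattened adjacency list
theorem pv_neigh_flatten (adjacencyList : List (List Int)) (u v : Int)
    (h : v ∈ pvNeigh adjacencyList u) : v ∈ adjacencyList.flatten := by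
  cases hg : PySem.List.pyGet? adjacencyList u with
  | none => rw [pvNeigh, hg] at h; cases h
  | some r =>
    rw [pvNeigh, hg] at h
    exact List.mem_flatten.2 ⟨r, PySem.List.mem_of_pyGet?_eq_some adjacencyList hg, h⟩

-- a nodup list of elements of L is no longer than L.dedup
theorem pv_nodup_length_le (l L : List Int) (hnd : l.Nodup) (hsub : ∀ x ∈ l, x ∈ L) :
    l.length ≤ L.dedup.length := by
  have h1 : l.toFinset.card = l.length := List.toFinset_card_of_nodup hnd
  have h2 : l.toFinset ⊆ L.toFinset := by
    intro a ha; simp only [List.mem_toFinset] at *; exact hsub a ha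
  have h3 : L.toFinset.card = L.dedup.length := List.card_toFinset L
  have := Finset.card_le_card h2
  omega

-- an entry of the dict is one of its values
theorem pv_get?_mem_values (m : PySem.Dict Int Int) (x j : Int)
    (h : PySem.Dict.get? m x = some j) : j ∈ PySem.Dict.values m := by
  have hi := PySem.Dict.mem_items_of_get?_eq_some m h
  simp only [PySem.Dict.values]
  exact List.mem_map.2 ⟨(x, j), hi, rfl⟩

-- a member of keys has an entry
theorem pv_mem_keys_get? (m : PySem.Dict Int Int) (x : Int)
    (h : x ∈ PySem.Dict.keys m) : ∃ j, PySem.Dict.get? m x = some j := by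
  cases hg : PySem.Dict.get? m x with
  | none => exact absurd h ((PySem.Dict.get?_eq_none_iff_not_mem_keys m x).mp hg)
  | some j => exact ⟨j, rfl⟩

theorem pv_max_append (l : List Int) (x v : Int)
    (h : PySem.List.max? l (fun y => y) = some x) :
    PySem.List.max? (l ++ [v]) (fun y => y) = some (max x v) := by
  cases l with
  | nil =>
    rw [show PySem.List.max? ([] : List Int) (fun y => y) = none from
      (PySem.List.max?_eq_none_iff _ _).2 rfl] at h
    cases h
  | cons c t =>
    rw [PySem.List.max?_id_cons] at h
    rw [List.cons_append, PySem.List.max?_id_cons]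
    simp only [List.foldl_append, List.foldl]
    rw [Option.some_inj] at h
    rw [h]

theorem pv_values_insert_fresh (m : PySem.Dict Int Int) (k v : Int)
    (h : PySem.Dict.get? m k = none) :
    PySem.Dict.values (PySem.Dict.insert m k v) = PySem.Dict.values m ++ [v] := by
  have hc : PySem.Dict.contains m k = false := by
    rw [PySem.Dict.contains_eq_isSome_get?, h]; rfl
  simp only [PySem.Dict.values, PySem.Dict.items_insert_of_not_contains m v hc,
    List.map_append, List.map]

-- changed-flag composition across an append of freshly inserted key lists
theorem pv_or_isEmpty (l1 l2 : List Int) (a : Bool) :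
    ((a || !l1.isEmpty) || !l2.isEmpty) = (a || !(l1 ++ l2).isEmpty) := by
  cases l1 <;> cases l2 <;> simp

-- master description of A's inner neighbour loop, tied to B's relaxNb
theorem pv_step_master (d : Int) :
    ∀ (nbs next : List Int) (m : PySem.Dict Int Int) (next' : List Int) (m' : PySem.Dict Int Int),
    stepA nbs d next m = some (next', m') →
    ∃ delta : List Int,
      next' = next ++ delta ∧
      PySem.Dict.keys m' = PySem.Dict.keys m ++ delta ∧
      (∀ ch : Bool, relaxNb nbs d m ch = some (m', ch || !delta.isEmpty)) ∧
      (∀ x ∈ delta, x ∈ nbs) ∧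
      (∀ x ∈ delta, PySem.Dict.get? m x = none ∧ PySem.Dict.get? m' x = some (d + 1)) ∧
      (∀ x j, PySem.Dict.get? m' x = some j →
        PySem.Dict.get? m x = some j ∨ (j = d + 1 ∧ x ∈ delta)) ∧
      (∀ x j, PySem.Dict.get? m x = some j → PySem.Dict.get? m' x = some j) ∧
      (∀ v ∈ nbs, (PySem.Dict.get? m' v).isSome) ∧
      (∀ v ∈ nbs, PySem.Dict.get? m v ≠ some d) ∧
      (PySem.List.max? (PySem.Dict.values m) (fun y => y)
          = some (if next = [] then d else d + 1) →
        PySem.List.max? (PySem.Dict.values m') (fun y => y)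
          = some (if next' = [] then d else d + 1)) := by
  intro nbs
  induction nbs with
  | nil =>
    intro next m next' m' h
    simp only [stepA, Option.some_inj, Prod.mk.injEq] at h
    obtain ⟨h1, h2⟩ := h; subst h1; subst h2
    refine ⟨[], by simp, by simp, ?_, by simp, by simp, ?_, ?_, by simp, by simp, ?_⟩
    · intro ch; simp [relaxNb]
    · intro x j hx; exact Or.inl hx
    · intro x j hx; exact hx
    · intro hm; simpa using hm
  | cons nb t ih =>
    intro next m next' m' h
    rw [stepA] at h
    cases hg : PySem.Dict.get? m nb with
    | none =>
      rw [hg] at h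
      have hc : PySem.Dict.contains m nb = false := by
        rw [PySem.Dict.contains_eq_isSome_get?, hg]; rfl
      obtain ⟨delta, hnext, hkeys, hrelax, hsub, hdel, hent, hpres, hclos, hnc, hmax⟩ :=
        ih _ _ _ _ h
      have hself : PySem.Dict.get? (PySem.Dict.insert m nb (d + 1)) nb = some (d + 1) :=
        PySem.Dict.get?_insert_self _ _ _
      refine ⟨nb :: delta, ?_, ?_, ?_, ?_, ?_, ?_, ?_, ?_, ?_, ?_⟩
      · rw [hnext]; simp
      · rw [hkeys, PySem.Dict.keys_insert_of_not_contains m (d + 1) hc]; simp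
      · intro ch
        simp only [relaxNb, hg]
        rw [hrelax true]; simp
      · intro x hx
        rcases List.mem_cons.1 hx with hx | hx
        · rw [hx]; exact List.mem_cons_self
        · exact List.mem_cons_of_mem _ (hsub x hx)
      · intro x hx
        rcases List.mem_cons.1 hx with hx | hx
        · subst hx; exact ⟨hg, hpres _ _ hself⟩
        · obtain ⟨hd1, hd2⟩ := hdel x hx
          have hne : x ≠ nb := by
            intro he; rw [he, hself] at hd1; cases hd1
          rw [PySem.Dict.get?_insert_of_ne m (d + 1) hne] at hd1
          exact ⟨hd1, hd2⟩
      · intro x j hx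
        rcases hent x j hx with hx' | hx'
        · by_cases hne : x = nb
          · subst hne; rw [hself] at hx'
            exact Or.inr ⟨(Option.some_inj.1 hx').symm, List.mem_cons_self⟩
          · rw [PySem.Dict.get?_insert_of_ne m (d + 1) hne] at hx'
            exact Or.inl hx'
        · exact Or.inr ⟨hx'.1, List.mem_cons_of_mem _ hx'.2⟩
      · intro x j hx
        have hne : x ≠ nb := by intro he; rw [he, hg] at hx; cases hx
        exact hpres x j (by rw [PySem.Dict.get?_insert_of_ne m (d + 1) hne]; exact hx)
      · intro v hv
        rcases List.mem_cons.1 hv with hv | hv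
        · subst hv; rw [hpres _ _ hself]; rfl
        · exact hclos v hv
      · intro v hv
        rcases List.mem_cons.1 hv with hv | hv
        · subst hv; rw [hg]; exact fun hh => by cases hh
        · intro hh
          exact hnc v hv (by
            have hne : v ≠ nb := by intro he; rw [he, hg] at hh; cases hh
            rw [PySem.Dict.get?_insert_of_ne m (d + 1) hne]; exact hh)
      · intro hm
        have hmI : PySem.List.max? (PySem.Dict.values (PySem.Dict.insert m nb (d + 1)))
            (fun y => y) = some (if next ++ [nb] = [] then d else d + 1) := by
          rw [pv_values_insert_fresh m nb (d + 1) hg, pv_max_append _ _ _ hm]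
          rw [if_neg (by simp : next ++ [nb] ≠ [])]
          by_cases hne : next = []
          · rw [if_pos hne]; congr 1; omega
          · rw [if_neg hne]; congr 1; omega
        exact hmax hmI
    | some w =>
      rw [hg] at h
      dsimp only at h
      by_cases hw : w = d
      · rw [if_pos hw] at h; cases h
      · rw [if_neg hw] at h
        obtain ⟨delta, hnext, hkeys, hrelax, hsub, hdel, hent, hpres, hclos, hnc, hmax⟩ :=
          ih _ _ _ _ h
        refine ⟨delta, hnext, hkeys, ?_, ?_, hdel, hent, hpres, ?_, ?_, hmax⟩
        · intro ch
          simp only [relaxNb, hg]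
          rw [if_neg hw]
          exact hrelax ch
        · intro x hx; exact List.mem_cons_of_mem _ (hsub x hx)
        · intro v hv
          rcases List.mem_cons.1 hv with hv | hv
          · subst hv; rw [hpres _ _ hg]; rfl
          · exact hclos v hv
        · intro v hv
          rcases List.mem_cons.1 hv with hv | hv
          · subst hv; rw [hg]
            intro hh; exact hw (Option.some_inj.1 hh)
          · exact hnc v hv

-- a failing inner loop of A is a failing relaxNb of B
theorem pv_step_none (d : Int) :
    ∀ (nbs next : List Int) (m : PySem.Dict Int Int),
    stepA nbs d next m = none → ∀ ch : Bool, relaxNb nbs d m ch = none := by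
  intro nbs
  induction nbs with
  | nil => intro next m h; simp [stepA] at h
  | cons nb t ih =>
    intro next m h ch
    rw [stepA] at h
    cases hg : PySem.Dict.get? m nb with
    | none =>
      rw [hg] at h
      simp only [relaxNb, hg]
      exact ih _ _ h true
    | some w =>
      rw [hg] at h
      dsimp only at h
      simp only [relaxNb, hg]
      by_cases hw : w = d
      · rw [if_pos hw]
      · rw [if_neg hw] at h
        rw [if_neg hw]
        exact ih _ _ h ch

-- master description of one completed level of A, tied to B's relaxKeys over the level
theorem pv_level_master (adjacencyList : List (List Int)) (d : Int) :
    ∀ (q : List Int) (fuel : Nat) (next : List Int) (m : PySem.Dict Int Int)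
      (next' : List Int) (m' : PySem.Dict Int Int) (fuel' : Nat),
    (∀ x ∈ q, PySem.Dict.get? m x = some d) →
    levelA adjacencyList fuel q d next m = .ok next' m' fuel' →
    ∃ delta : List Int,
      next' = next ++ delta ∧
      PySem.Dict.keys m' = PySem.Dict.keys m ++ delta ∧
      fuel = fuel' + q.length ∧
      (∀ ch : Bool, relaxKeys adjacencyList q m ch = some (m', ch || !delta.isEmpty)) ∧
      (∀ x ∈ delta, x ∈ adjacencyList.flatten) ∧
      (∀ x ∈ delta, PySem.Dict.get? m x = none ∧ PySem.Dict.get? m' x = some (d + 1)) ∧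
      (∀ x j, PySem.Dict.get? m' x = some j →
        PySem.Dict.get? m x = some j ∨ (j = d + 1 ∧ x ∈ delta)) ∧
      (∀ x j, PySem.Dict.get? m x = some j → PySem.Dict.get? m' x = some j) ∧
      (∀ u ∈ q, ∀ v ∈ pvNeigh adjacencyList u, (PySem.Dict.get? m' v).isSome) ∧
      (∀ u ∈ q, ∀ v ∈ pvNeigh adjacencyList u, PySem.Dict.get? m v ≠ some d) ∧
      (PySem.List.max? (PySem.Dict.values m) (fun y => y)
          = some (if next = [] then d else d + 1) →
        PySem.List.max? (PySem.Dict.values m') (fun y => y)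
          = some (if next' = [] then d else d + 1)) := by
  intro q
  induction q with
  | nil =>
    intro fuel next m next' m' fuel' _ h
    rw [levelA] at h
    cases h
    refine ⟨[], by simp, by simp, by simp, ?_, by simp, by simp, ?_, ?_, by simp, by simp, ?_⟩
    · intro ch; simp [relaxKeys]
    · intro x j hx; exact Or.inl hx
    · intro x j hx; exact hx
    · intro hm; simpa using hm
  | cons x rest ih =>
    intro fuel next m next' m' fuel' hq h
    cases fuel with
    | zero => simp [levelA] at h
    | succ f =>
      rw [levelA] at h
      cases hs : stepA (pvNeigh adjacencyList x) d next m with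
      | none => rw [hs] at h; cases h
      | some p =>
        rw [hs] at h
        dsimp only at h
        obtain ⟨d1, s_next, s_keys, s_relax, s_sub, s_del, s_ent, s_pres, s_clos, s_nc, s_max⟩ :=
          pv_step_master d _ _ _ _ _ hs
        have hq' : ∀ y ∈ rest, PySem.Dict.get? p.2 y = some d := fun y hy =>
          s_pres y d (hq y (List.mem_cons_of_mem _ hy))
        obtain ⟨d2, l_next, l_keys, l_fuel, l_relax, l_flat, l_del, l_ent, l_pres, l_clos, l_nc, l_max⟩ :=
          ih f p.1 p.2 next' m' fuel' hq' h
        refine ⟨d1 ++ d2, ?_, ?_, ?_, ?_, ?_, ?_, ?_, ?_, ?_, ?_, ?_⟩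
        · rw [l_next, s_next, List.append_assoc]
        · rw [l_keys, s_keys, List.append_assoc]
        · simp only [List.length_cons]; omega
        · intro ch
          have hdx : PySem.Dict.getD m x 0 = d := by
            rw [PySem.Dict.getD_eq_get?_getD, hq x List.mem_cons_self]; rfl
          simp only [relaxKeys, hdx]
          rw [s_relax ch]
          dsimp only
          rw [l_relax (ch || !d1.isEmpty), pv_or_isEmpty]
        · intro y hy
          rcases List.mem_append.1 hy with hy | hy
          · exact pv_neigh_flatten adjacencyList x y (s_sub y hy)
          · exact l_flat y hy
        · intro y hy
          rcases List.mem_append.1 hy with hy | hy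
          · exact ⟨(s_del y hy).1, l_pres _ _ (s_del y hy).2⟩
          · refine ⟨?_, (l_del y hy).2⟩
            cases hgm : PySem.Dict.get? m y with
            | none => rfl
            | some j =>
              have hcontra := s_pres y j hgm
              rw [(l_del y hy).1] at hcontra
              cases hcontra
        · intro y j hy
          rcases l_ent y j hy with hy' | hy'
          · rcases s_ent y j hy' with hy'' | hy''
            · exact Or.inl hy''
            · exact Or.inr ⟨hy''.1, List.mem_append.2 (Or.inl hy''.2)⟩
          · exact Or.inr ⟨hy'.1, List.mem_append.2 (Or.inr hy'.2)⟩
        · intro y j hy; exact l_pres y j (s_pres y j hy)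
        · intro u hu v hv
          rcases List.mem_cons.1 hu with hu | hu
          · subst hu
            obtain ⟨w, hw⟩ := Option.isSome_iff_exists.1 (s_clos v hv)
            rw [l_pres v w hw]; rfl
          · exact l_clos u hu v hv
        · intro u hu v hv
          rcases List.mem_cons.1 hu with hu | hu
          · subst hu; exact s_nc v hv
          · intro hh; exact l_nc u hu v hv (s_pres v d hh)
        · intro hm; exact l_max (s_max hm)

-- a failing level of A is a failing relaxKeys round segment of B
theorem pv_level_fail (adjacencyList : List (List Int)) (d : Int) :
    ∀ (q : List Int) (fuel : Nat) (next : List Int) (m : PySem.Dict Int Int),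
    (∀ x ∈ q, PySem.Dict.get? m x = some d) →
    levelA adjacencyList fuel q d next m = .fail →
    ∀ ch : Bool, relaxKeys adjacencyList q m ch = none := by
  intro q
  induction q with
  | nil => intro fuel next m _ h; rw [levelA] at h; cases h
  | cons x rest ih =>
    intro fuel next m hq h ch
    cases fuel with
    | zero => simp [levelA] at h
    | succ f =>
      rw [levelA] at h
      have hdx : PySem.Dict.getD m x 0 = d := by
        rw [PySem.Dict.getD_eq_get?_getD, hq x List.mem_cons_self]; rfl
      cases hs : stepA (pvNeigh adjacencyList x) d next m with
      | none =>
        simp only [relaxKeys, hdx]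
        rw [pv_step_none d _ _ _ hs ch]
      | some p =>
        rw [hs] at h
        dsimp only at h
        obtain ⟨d1, _, _, s_relax, _, _, _, s_pres, _, _, _⟩ :=
          pv_step_master d _ _ _ _ _ hs
        have hq' : ∀ y ∈ rest, PySem.Dict.get? p.2 y = some d := fun y hy =>
          s_pres y d (hq y (List.mem_cons_of_mem _ hy))
        simp only [relaxKeys, hdx]
        rw [s_relax ch]
        exact ih f p.1 p.2 hq' h _

-- exhaustion means the fuel was below the level length
theorem pv_level_exhausted (adjacencyList : List (List Int)) (d : Int) :
    ∀ (q : List Int) (fuel : Nat) (next : List Int) (m : PySem.Dict Int Int),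
    levelA adjacencyList fuel q d next m = .exhausted → fuel < q.length := by
  intro q
  induction q with
  | nil => intro fuel next m h; rw [levelA] at h; cases h
  | cons x rest ih =>
    intro fuel next m h
    cases fuel with
    | zero => simp
    | succ f =>
      rw [levelA] at h
      cases hs : stepA (pvNeigh adjacencyList x) d next m with
      | none => rw [hs] at h; cases h
      | some p =>
        rw [hs] at h
        dsimp only at h
        have := ih f p.1 p.2 h
        simpa using Nat.succ_lt_succ this

-- relaxNb keeps the dict when every neighbour is present at a different level
theorem pv_relaxNb_noop (du : Int) :
    ∀ (nbs : List Int) (m : PySem.Dict Int Int) (ch : Bool),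
    (∀ v ∈ nbs, (PySem.Dict.get? m v).isSome ∧ PySem.Dict.get? m v ≠ some du) →
    relaxNb nbs du m ch = some (m, ch) := by
  intro nbs
  induction nbs with
  | nil => intro m ch _; rfl
  | cons v rest ih =>
    intro m ch hall
    obtain ⟨hs, hne⟩ := hall v List.mem_cons_self
    obtain ⟨w, hw⟩ := Option.isSome_iff_exists.1 hs
    simp only [relaxNb, hw]
    rw [if_neg (by intro he; rw [hw, he] at hne; exact hne rfl)]
    exact ih m ch (fun y hy => hall y (List.mem_cons_of_mem _ hy))

-- relaxKeys keeps the dict over fully processed, conflict-free keys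
theorem pv_relaxKeys_noop (adjacencyList : List (List Int)) :
    ∀ (l : List Int) (m : PySem.Dict Int Int) (ch : Bool),
    (∀ u ∈ l, (PySem.Dict.get? m u).isSome) →
    (∀ u ∈ l, ∀ v ∈ pvNeigh adjacencyList u,
      (PySem.Dict.get? m v).isSome ∧ PySem.Dict.get? m v ≠ PySem.Dict.get? m u) →
    relaxKeys adjacencyList l m ch = some (m, ch) := by
  intro l
  induction l with
  | nil => intro m ch _ _; rfl
  | cons u t ih =>
    intro m ch hmem hall
    obtain ⟨w, hw⟩ := Option.isSome_iff_exists.1 (hmem u List.mem_cons_self)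
    have hdu : PySem.Dict.getD m u 0 = w := by
      rw [PySem.Dict.getD_eq_get?_getD, hw]; rfl
    simp only [relaxKeys, hdu]
    rw [pv_relaxNb_noop w (pvNeigh adjacencyList u) m ch (by
      intro v hv
      refine ⟨(hall u List.mem_cons_self v hv).1, ?_⟩
      have := (hall u List.mem_cons_self v hv).2
      rw [hw] at this
      exact this)]
    exact ih m ch (fun y hy => hmem y (List.mem_cons_of_mem _ hy))
      (fun y hy => hall y (List.mem_cons_of_mem _ hy))

theorem pv_relaxKeys_append (adjacencyList : List (List Int)) :
    ∀ (l1 l2 : List Int) (m m1 : PySem.Dict Int Int) (ch c1 : Bool),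
    relaxKeys adjacencyList l1 m ch = some (m1, c1) →
    relaxKeys adjacencyList (l1 ++ l2) m ch = relaxKeys adjacencyList l2 m1 c1 := by
  intro l1
  induction l1 with
  | nil =>
    intro l2 m m1 ch c1 h
    simp only [relaxKeys, Option.some_inj, Prod.mk.injEq] at h
    rw [List.nil_append, h.1, h.2]
  | cons u t ih =>
    intro l2 m m1 ch c1 h
    simp only [relaxKeys] at h
    rw [List.cons_append, relaxKeys]
    cases hr : relaxNb (pvNeigh adjacencyList u) (PySem.Dict.getD m u 0) m ch with
    | none => rw [hr] at h; cases h
    | some p =>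
      rw [hr] at h
      dsimp only at h
      dsimp only
      exact ih l2 p.1 m1 p.2 c1 h

-- relaxNb and relaxKeys keep the keys without duplicates
theorem pv_relaxNb_nodup (du : Int) :
    ∀ (nbs : List Int) (m m' : PySem.Dict Int Int) (ch c' : Bool),
    relaxNb nbs du m ch = some (m', c') →
    (PySem.Dict.keys m).Nodup → (PySem.Dict.keys m').Nodup := by
  intro nbs
  induction nbs with
  | nil =>
    intro m m' ch c' h hnd
    simp only [relaxNb, Option.some_inj, Prod.mk.injEq] at h
    rw [← h.1]; exact hnd
  | cons v rest ih =>
    intro m m' ch c' h hnd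
    simp only [relaxNb] at h
    cases hg : PySem.Dict.get? m v with
    | none =>
      rw [hg] at h
      exact ih _ m' true c' h (PySem.Dict.nodup_keys_insert m v (du + 1) hnd)
    | some w =>
      rw [hg] at h
      dsimp only at h
      by_cases hw : w = du
      · rw [if_pos hw] at h; cases h
      · rw [if_neg hw] at h; exact ih m m' ch c' h hnd

theorem pv_relaxKeys_nodup (adjacencyList : List (List Int)) :
    ∀ (l : List Int) (m m' : PySem.Dict Int Int) (ch c' : Bool),
    relaxKeys adjacencyList l m ch = some (m', c') →
    (PySem.Dict.keys m).Nodup → (PySem.Dict.keys m').Nodup := by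
  intro l
  induction l with
  | nil =>
    intro m m' ch c' h hnd
    simp only [relaxKeys, Option.some_inj, Prod.mk.injEq] at h
    rw [← h.1]; exact hnd
  | cons u t ih =>
    intro m m' ch c' h hnd
    simp only [relaxKeys] at h
    cases hr : relaxNb (pvNeigh adjacencyList u) (PySem.Dict.getD m u 0) m ch with
    | none => rw [hr] at h; cases h
    | some p =>
      rw [hr] at h
      dsimp only at h
      exact ih p.1 m' p.2 c' h (pv_relaxNb_nodup _ _ m p.1 ch p.2 hr hnd)

-- main simulation: A's level loop against B's relaxation rounds, one level per round
theorem pv_main (adjacencyList : List (List Int)) (startNode : Int) :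
    ∀ (fA fB : Nat) (depth : Int) (q P : List Int) (m : PySem.Dict Int Int),
    PySem.Dict.keys m = P ++ q →
    (∀ x ∈ q, PySem.Dict.get? m x = some (depth + 1)) →
    (∀ x j, PySem.Dict.get? m x = some j → j = depth + 1 → x ∈ q) →
    (PySem.List.max? (PySem.Dict.values m) (fun y => y)
        = some (if q = [] then depth else depth + 1)) →
    (∀ u ∈ P, ∀ v ∈ pvNeigh adjacencyList u, (PySem.Dict.get? m v).isSome) →
    (∀ u ∈ P, ∀ v ∈ pvNeigh adjacencyList u,
      PySem.Dict.get? m v ≠ PySem.Dict.get? m u) →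
    (PySem.Dict.keys m).Nodup →
    (∀ x ∈ PySem.Dict.keys m, x ∈ startNode :: adjacencyList.flatten) →
    q.length + (startNode :: adjacencyList.flatten).dedup.length + 1
        ≤ fA + (PySem.Dict.keys m).length →
    (startNode :: adjacencyList.flatten).dedup.length + 1 ≤ fB + (PySem.Dict.keys m).length →
    outerA adjacencyList fA depth q m =
      (match relaxLoop adjacencyList fB m with
       | .conflict => -1
       | .exhausted => -2
       | .out finalDist =>
         (PySem.List.max? (PySem.Dict.values finalDist) (fun y => y)).getD 0) := by
  intro fA
  induction fA using Nat.strong_induction_on with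
  | _ fA IH =>
    intro fB depth q P m hkeysPQ hq hval hmax hclos hnc hnd hsub hfA hfB
    have hbound : (PySem.Dict.keys m).length ≤
        (startNode :: adjacencyList.flatten).dedup.length :=
      pv_nodup_length_le _ _ hnd hsub
    have hmemP : ∀ u ∈ P, (PySem.Dict.get? m u).isSome := by
      intro u hu
      obtain ⟨w, hw⟩ := pv_mem_keys_get? m u (by
        rw [hkeysPQ]; exact List.mem_append.2 (Or.inl hu))
      rw [hw]; rfl
    have hnoopP : relaxKeys adjacencyList P m false = some (m, false) :=
      pv_relaxKeys_noop adjacencyList P m false hmemP (by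
        intro u hu v hv
        exact ⟨hclos u hu v hv, hnc u hu v hv⟩)
    cases q with
    | nil =>
      rw [outerA, dif_pos rfl]
      cases fB with
      | zero => exact absurd hfB (by omega)
      | succ f =>
        have hP : PySem.Dict.keys m = P := by simpa using hkeysPQ
        rw [relaxLoop, hP, hnoopP]
        dsimp only
        rw [if_neg (by simp)]
        dsimp only
        rw [if_pos rfl] at hmax
        rw [hmax]
        rfl
    | cons x rest =>
      have hne : x :: rest ≠ ([] : List Int) := by simp
      rw [outerA, dif_neg hne]
      rw [if_neg hne] at hmax
      cases fB with
      | zero => exact absurd hfB (by omega)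
      | succ f =>
        cases hl : levelA adjacencyList fA (x :: rest) (depth + 1) [] m with
        | exhausted =>
          have := pv_level_exhausted adjacencyList (depth + 1) (x :: rest) fA [] m hl
          exact absurd hfA (by simp at this ⊢; omega)
        | fail =>
          have hfailq : relaxKeys adjacencyList (x :: rest) m false = none :=
            pv_level_fail adjacencyList (depth + 1) (x :: rest) fA [] m hq hl false
          have hround : relaxKeys adjacencyList (PySem.Dict.keys m) m false = none := by
            rw [hkeysPQ, pv_relaxKeys_append adjacencyList P (x :: rest) m m false false hnoopP]
            exact hfailq
          rw [relaxLoop, hround]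
        | ok q' m' fuel' =>
          obtain ⟨delta, l_next, l_keys, l_fuel, l_relax, l_flat, l_del, l_ent, l_pres,
              l_clos, l_nc, l_max⟩ :=
            pv_level_master adjacencyList (depth + 1) (x :: rest) fA [] m q' m' fuel' hq hl
          rw [List.nil_append] at l_next
          subst l_next
          have hround : relaxKeys adjacencyList (PySem.Dict.keys m) m false
              = some (m', !q'.isEmpty) := by
            rw [hkeysPQ, pv_relaxKeys_append adjacencyList P (x :: rest) m m false false hnoopP]
            simpa using l_relax false
          have hnd' : (PySem.Dict.keys m').Nodup :=
            pv_relaxKeys_nodup adjacencyList (PySem.Dict.keys m) m m' false _ hround hnd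
          have hmax' : PySem.List.max? (PySem.Dict.values m') (fun y => y)
              = some (if q' = [] then depth + 1 else depth + 1 + 1) := by
            have := l_max (by rw [if_pos rfl]; exact hmax)
            simpa using this
          rw [relaxLoop, hround]
          dsimp only
          cases hde : q'.isEmpty with
          | true =>
            have hdnil : q' = [] := by simpa using hde
            rw [if_neg (by simp)]
            dsimp only
            subst hdnil
            rw [outerA, dif_pos rfl]
            rw [if_pos rfl] at hmax'
            rw [hmax']
            rfl
          | false =>
            have hdnn : q' ≠ [] := by
              intro he; rw [he] at hde; simp at hde
            rw [if_pos (by simp)]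
            have hclos' : ∀ u ∈ P ++ x :: rest, ∀ v ∈ pvNeigh adjacencyList u,
                (PySem.Dict.get? m' v).isSome := by
              intro u hu v hv
              rcases List.mem_append.1 hu with hu | hu
              · obtain ⟨w, hw⟩ := Option.isSome_iff_exists.1 (hclos u hu v hv)
                rw [l_pres v w hw]; rfl
              · exact l_clos u hu v hv
            have hnc' : ∀ u ∈ P ++ x :: rest, ∀ v ∈ pvNeigh adjacencyList u,
                PySem.Dict.get? m' v ≠ PySem.Dict.get? m' u := by
              intro u hu v hv
              rcases List.mem_append.1 hu with hu | hu
              · obtain ⟨w, hw⟩ := pv_mem_keys_get? m u (by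
                  rw [hkeysPQ]; exact List.mem_append.2 (Or.inl hu))
                obtain ⟨w2, hw2⟩ := Option.isSome_iff_exists.1 (hclos u hu v hv)
                rw [l_pres v w2 hw2, l_pres u w hw]
                have := hnc u hu v hv
                rw [hw, hw2] at this
                simpa using this
              · rw [l_pres u (depth + 1) (hq u hu)]
                intro hh
                rcases l_ent v (depth + 1) hh with hh' | hh'
                · exact l_nc u hu v hv hh'
                · omega
            have hval' : ∀ y j, PySem.Dict.get? m' y = some j → j = depth + 1 + 1 →
                y ∈ q' := by
              intro y j hy hj
              rcases l_ent y j hy with hy' | hy'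
              · exfalso
                have hmem := pv_get?_mem_values m y j hy'
                have := PySem.List.max?_isMax hmax j hmem
                simp only at this
                omega
              · exact hy'.2
            have hq' : ∀ y ∈ q', PySem.Dict.get? m' y = some (depth + 1 + 1) :=
              fun y hy => (l_del y hy).2
            have hsub' : ∀ y ∈ PySem.Dict.keys m', y ∈ startNode :: adjacencyList.flatten := by
              intro y hy
              rw [l_keys] at hy
              rcases List.mem_append.1 hy with hy | hy
              · exact hsub y hy
              · exact List.mem_cons_of_mem _ (l_flat y hy)
            have hdlen : 1 ≤ q'.length := by
              cases q' with
              | nil => exact absurd rfl hdnn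
              | cons a b => simp
            have hklen : (PySem.Dict.keys m').length
                = (PySem.Dict.keys m).length + q'.length := by
              rw [l_keys, List.length_append]
            refine IH fuel' (by simp at l_fuel; omega) f (depth + 1) q' (P ++ x :: rest) m'
              (by rw [l_keys, hkeysPQ]) hq' hval'
              (by rw [if_neg hdnn] at hmax'; rw [if_neg hdnn]; exact hmax')
              hclos' hnc' hnd' hsub' ?_ ?_
            · rw [hklen]
              simp only [List.length_cons] at hfA l_fuel
              omega
            · rw [hklen]
              omega

-- ===== VERDICT (by name: the statement is the Claim_ definition above) =====
theorem bfs_spec : Claim_equal_bfs := by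
  intro adjacencyList startNode _ _
  unfold Spec_bfs bfs bfs_alt
  have hge : PySem.Dict.get? ((PySem.Dict.empty : PySem.Dict Int Int).insert startNode 1) startNode = some 1 :=
    PySem.Dict.get?_insert_self _ _ _
  have hce : PySem.Dict.contains (PySem.Dict.empty : PySem.Dict Int Int) startNode = false := by
    rw [PySem.Dict.contains_eq_isSome_get?, PySem.Dict.get?_empty]; rfl
  have hk0 : PySem.Dict.keys ((PySem.Dict.empty : PySem.Dict Int Int).insert startNode 1)
      = [startNode] := by
    rw [PySem.Dict.keys_insert_of_not_contains _ _ hce]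
    simp
  apply pv_main adjacencyList startNode (adjacencyList.flatten.length + 2)
    (adjacencyList.flatten.length + 2) 0 [startNode] [] _
  · rw [hk0]; rfl
  · intro y hy
    rw [List.mem_singleton.1 hy]
    exact hge
  · intro y j hy hj
    rw [PySem.Dict.get?_insert] at hy
    by_cases he : y = startNode
    · simp [he]
    · rw [if_neg he, PySem.Dict.get?_empty] at hy; cases hy
  · rw [if_neg (by simp : ([startNode] : List Int) ≠ [])]
    rw [pv_values_insert_fresh _ _ _ (PySem.Dict.get?_empty _)]
    rw [show PySem.Dict.values (PySem.Dict.empty : PySem.Dict Int Int) ++ [(1 : Int)] = [1] from rfl]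
    rw [PySem.List.max?_id_cons]
    rfl
  · intro u hu; cases hu
  · intro u hu; cases hu
  · rw [hk0]; simp
  · intro y hy
    rw [hk0, List.mem_singleton] at hy
    rw [hy]; exact List.mem_cons_self
  · have := List.Sublist.length_le (List.dedup_sublist (startNode :: adjacencyList.flatten))
    rw [hk0]
    simp only [List.length_cons] at this ⊢
    omega
  · have := List.Sublist.length_le (List.dedup_sublist (startNode :: adjacencyList.flatten))
    rw [hk0]
    simp only [List.length_cons] at this ⊢
    omega
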